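-- pv_equiv track=rewrite | github.com/PROGRAMMINinGPYTHON/minilogia | OIJ_olimpiada_konkurs/programy_2.py | przetwarzanie
-- ===== SOURCE A (Python) =====
-- def przetwarzanie(rozmiary_programow, rozmiary_plyt):
--     lcz = 0
--     for i in range(len(rozmiary_plyt)):
--         for j in range(len(rozmiary_plyt)):
--             if i+j == len(rozmiary_plyt):
--                 break
--             else:
--                 if rozmiary_plyt[i] >= rozmiary_programow[i+j]:
--                     lcz = lcz + 1
--                     break
--                 else:
--                     pass
--     return lcz
-- ===== SOURCE B (Python) =====
-- def przetwarzanie(rozmiary_programow, rozmiary_plyt):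
--     n = len(rozmiary_plyt)
--     lcz = 0
--     m = None  # running minimum of rozmiary_programow[i:n]
--     for i in range(n - 1, -1, -1):
--         p = rozmiary_programow[i]
--         if m is None or p < m:
--             m = p
--         if rozmiary_plyt[i] >= m:
--             lcz += 1
--     return lcz
-- ===== Notes on version B (the rewrite author's own statement) =====
-- stated objective: faster
-- what changed: Replaced the quadratic inner scan over program indices by a single backward pass that maintains the running suffix minimum of rozmiary_programow, counting plates that are >= that minimum.
import Mathlib
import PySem

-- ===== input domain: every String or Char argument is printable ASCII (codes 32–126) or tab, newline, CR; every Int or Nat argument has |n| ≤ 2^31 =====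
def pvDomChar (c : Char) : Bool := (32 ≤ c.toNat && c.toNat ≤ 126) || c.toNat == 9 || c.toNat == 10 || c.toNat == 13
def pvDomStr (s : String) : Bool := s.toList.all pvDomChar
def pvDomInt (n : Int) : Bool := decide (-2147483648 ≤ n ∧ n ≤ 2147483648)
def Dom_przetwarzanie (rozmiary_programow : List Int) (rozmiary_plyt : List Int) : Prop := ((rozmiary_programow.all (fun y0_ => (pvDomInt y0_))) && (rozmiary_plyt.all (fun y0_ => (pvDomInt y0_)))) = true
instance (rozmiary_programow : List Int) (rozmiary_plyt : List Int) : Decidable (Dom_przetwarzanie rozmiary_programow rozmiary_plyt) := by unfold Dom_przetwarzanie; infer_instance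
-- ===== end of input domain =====

-- ===== PORT A =====
-- B replaces A's quadratic inner scan by one backward pass keeping the running suffix minimum (objective: faster).
-- Inner 'for j' loop of A: breaks at i+j == len(plyt), or counts 1 and breaks on the first match.
def przetwarzanieInner (rozmiary_programow rozmiary_plyt : List Int) (n i : Int) : List Int → Int
  | [] => 0
  | j :: js =>
    if i + j = n then 0
    else if PySem.List.pyGetD rozmiary_plyt i 0 ≥ PySem.List.pyGetD rozmiary_programow (i + j) 0 then 1
    else przetwarzanieInner rozmiary_programow rozmiary_plyt n i js

def przetwarzanie (rozmiary_programow : List Int) (rozmiary_plyt : List Int) : Int :=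
  (PySem.List.pyRange 0 rozmiary_plyt.length 1).foldl
    (fun lcz i => lcz + przetwarzanieInner rozmiary_programow rozmiary_plyt rozmiary_plyt.length i
        (PySem.List.pyRange 0 rozmiary_plyt.length 1)) 0

-- ===== PORT B =====
def przetwarzanie_alt (rozmiary_programow : List Int) (rozmiary_plyt : List Int) : Int :=
  let n : Int := rozmiary_plyt.length
  ((PySem.List.pyRange (n - 1) (-1) (-1)).foldl
    (fun (st : Int × Option Int) i =>
      let p := PySem.List.pyGetD rozmiary_programow i 0
      let m := match st.2 with
        | none => p
        | some mv => if p < mv then p else mv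
      (if PySem.List.pyGetD rozmiary_plyt i 0 ≥ m then st.1 + 1 else st.1, some m))
    (0, none)).1

-- ===== PRECONDITION & SPEC =====
-- A (and B alike) raises IndexError whenever rozmiary_plyt is longer than rozmiary_programow
-- (index len(rozmiary_plyt)-1 of rozmiary_programow is always read); Pre_ excludes exactly those inputs.
def Pre_przetwarzanie (rozmiary_programow : List Int) (rozmiary_plyt : List Int) : Prop :=
  rozmiary_plyt.length ≤ rozmiary_programow.length
instance (rozmiary_programow : List Int) (rozmiary_plyt : List Int) : Decidable (Pre_przetwarzanie rozmiary_programow rozmiary_plyt) := by unfold Pre_przetwarzanie; infer_instance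
def pvWitness_przetwarzanie : List Int × List Int := ([3, 1, 4], [2, 2])
def Spec_przetwarzanie (rozmiary_programow : List Int) (rozmiary_plyt : List Int) (out : Int) : Prop := out = przetwarzanie_alt rozmiary_programow rozmiary_plyt
instance (rozmiary_programow : List Int) (rozmiary_plyt : List Int) (out : Int) : Decidable (Spec_przetwarzanie rozmiary_programow rozmiary_plyt out) := by unfold Spec_przetwarzanie; infer_instance

-- ===== CLAIM (what is proved, stated in full; the proofs are below) =====
def Claim_equal_przetwarzanie : Prop := ∀ (rozmiary_programow : List Int) (rozmiary_plyt : List Int), Dom_przetwarzanie rozmiary_programow rozmiary_plyt → Pre_przetwarzanie rozmiary_programow rozmiary_plyt → Spec_przetwarzanie rozmiary_programow rozmiary_plyt (przetwarzanie rozmiary_programow rozmiary_plyt)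

-- ===== LEMMAS AND PROOFS =====
-- min of rozmiary_programow over indices [k, n), as an Option (none iff the suffix is empty)
def sufMin? (prog : List Int) (n k : Nat) : Option Int := ((prog.take n).drop k).min?

def sufMin (prog : List Int) (n k : Nat) : Int := (sufMin? prog n k).getD 0

-- the per-index predicate both programs decide: plate i is at least the min of programs i..n-1
def hit (prog plyt : List Int) (i : Nat) : Bool :=
  decide (sufMin prog plyt.length i ≤ PySem.List.pyGetD plyt (i : Int) 0)

def cntTo (prog plyt : List Int) (k : Nat) : Int := ((List.range k).countP (hit prog plyt) : Int)

lemma sufMin?_cons (prog : List Int) (n k : Nat) (hk : k < n) (hn : n ≤ prog.length) :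
    sufMin? prog n k = some (match sufMin? prog n (k + 1) with
      | none => prog[k]'(by omega)
      | some y => min (prog[k]'(by omega)) y) := by
  unfold sufMin?
  have hlt : k < (prog.take n).length := by simp; omega
  rw [List.drop_eq_getElem_cons hlt, List.min?_cons]
  cases h : ((prog.take n).drop (k+1)).min? <;> simp [List.getElem_take]

lemma if_lt_eq_min (p mv : Int) : (if p < mv then p else mv) = min p mv := by
  simp only [min_def]; split_ifs <;> omega

lemma cntTo_succ (prog plyt : List Int) (k : Nat) :
    cntTo prog plyt (k + 1) = cntTo prog plyt k + (if hit prog plyt k then 1 else 0) := by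
  unfold cntTo
  rw [List.range_succ, List.countP_append]
  by_cases h : hit prog plyt k <;> simp [h]

lemma sufMin?_eq_none (prog : List Int) (n k : Nat) (h : n ≤ k) :
    sufMin? prog n k = none := by
  unfold sufMin?
  rw [List.drop_eq_nil_of_le (by simp; omega)]
  rfl

lemma inner_eq (prog plyt : List Int) (hlen : plyt.length ≤ prog.length)
    (i j0 : Int) (hi : 0 ≤ i) (hj : 0 ≤ j0) (hij : i + j0 ≤ (plyt.length : Int)) :
    przetwarzanieInner prog plyt plyt.length i (PySem.List.pyRange j0 plyt.length 1)
    = if i + j0 = (plyt.length : Int) then 0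
      else if sufMin prog plyt.length (i + j0).toNat ≤ PySem.List.pyGetD plyt i 0 then 1 else 0 := by
  induction ht : ((plyt.length : Int) - j0).toNat generalizing j0 with
  | zero =>
    have hj0n : (plyt.length : Int) ≤ j0 := by omega
    rw [PySem.List.pyRange_one_eq_nil hj0n]
    have : i + j0 = (plyt.length : Int) := by omega
    simp [przetwarzanieInner, this]
  | succ t ih =>
    have hj0n : j0 < (plyt.length : Int) := by omega
    rw [PySem.List.pyRange_one_cons hj0n]
    show przetwarzanieInner prog plyt plyt.length i (j0 :: _) = _
    unfold przetwarzanieInner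
    by_cases hbr : i + j0 = (plyt.length : Int)
    · simp [hbr]
    · rw [if_neg hbr, if_neg hbr]
      have hkn : (i + j0).toNat < plyt.length := by omega
      have hkp : (i + j0).toNat < prog.length := by omega
      have hprog : PySem.List.pyGetD prog (i + j0) 0 = prog[(i + j0).toNat] :=
        PySem.List.pyGetD_eq_getElem (xs := prog) (d := 0) (by omega) (by omega)
      have hsc := sufMin?_cons prog plyt.length (i + j0).toNat hkn hlen
      by_cases hcmp : PySem.List.pyGetD plyt i 0 ≥ PySem.List.pyGetD prog (i + j0) 0
      · rw [if_pos hcmp]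
        have hle : sufMin prog plyt.length (i + j0).toNat ≤ prog[(i + j0).toNat] := by
          unfold sufMin; rw [hsc]
          cases sufMin? prog plyt.length ((i + j0).toNat + 1) <;> simp
        rw [if_pos (le_trans hle (by rw [← hprog]; exact hcmp))]
      · rw [if_neg hcmp]
        rw [ih (j0 + 1) (by omega) (by omega) (by omega)]
        have hk1 : (i + (j0 + 1)).toNat = (i + j0).toNat + 1 := by omega
        rw [hk1]
        have hplt : PySem.List.pyGetD plyt i 0 < prog[(i + j0).toNat] := by
          rw [← hprog]; omega
        by_cases hend : i + (j0 + 1) = (plyt.length : Int)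
        · rw [if_pos hend]
          have hn1 : sufMin? prog plyt.length ((i + j0).toNat + 1) = none :=
            sufMin?_eq_none _ _ _ (by omega)
          have hM : sufMin prog plyt.length (i + j0).toNat = prog[(i + j0).toNat] := by
            unfold sufMin; rw [hsc, hn1]; rfl
          rw [hM, if_neg (by omega)]
        · rw [if_neg hend]
          obtain ⟨y0, hy0⟩ : ∃ y0, sufMin? prog plyt.length ((i + j0).toNat + 1) = some y0 := by
            have := sufMin?_cons prog plyt.length ((i + j0).toNat + 1) (by omega) hlen
            exact ⟨_, this⟩
          have hM1 : sufMin prog plyt.length ((i + j0).toNat + 1) = y0 := by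
            unfold sufMin; rw [hy0]; rfl
          have hM0 : sufMin prog plyt.length (i + j0).toNat = min prog[(i + j0).toNat] y0 := by
            unfold sufMin; rw [hsc, hy0]; rfl
          rw [hM1, hM0]
          have hiff : (min prog[(i + j0).toNat] y0 ≤ PySem.List.pyGetD plyt i 0)
              ↔ (y0 ≤ PySem.List.pyGetD plyt i 0) := by
            rw [min_le_iff]
            constructor
            · rintro (h | h) <;> omega
            · intro h; exact Or.inr h
          rw [if_congr hiff rfl rfl]

lemma alt_inv (prog plyt : List Int) (hlen : plyt.length ≤ prog.length)
    (a : Int) (ha : -1 ≤ a) (ha2 : a < (plyt.length : Int)) (lcz : Int) :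
    ((PySem.List.pyRange a (-1) (-1)).foldl
      (fun (st : Int × Option Int) i =>
        let p := PySem.List.pyGetD prog i 0
        let m := match st.2 with
          | none => p
          | some mv => if p < mv then p else mv
        (if PySem.List.pyGetD plyt i 0 ≥ m then st.1 + 1 else st.1, some m))
      (lcz, sufMin? prog plyt.length (a + 1).toNat)).1
    = lcz + cntTo prog plyt (a + 1).toNat := by
  induction ht : (a + 1).toNat generalizing a lcz with
  | zero =>
    have haeq : a = -1 := by omega
    subst haeq
    rw [PySem.List.pyRange_neg_one_eq_nil le_rfl]
    simp [cntTo]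
  | succ t ih =>
    have ha0 : 0 ≤ a := by omega
    rw [← ht]
    rw [PySem.List.pyRange_neg_one_cons (by omega : (-1 : Int) < a), List.foldl_cons]
    have hkn : a.toNat < plyt.length := by omega
    have hprog : PySem.List.pyGetD prog a 0 = prog[a.toNat] :=
      PySem.List.pyGetD_eq_getElem (xs := prog) (d := 0) (by omega) (by omega)
    have ha1 : (a + 1).toNat = a.toNat + 1 := by omega
    have hsc := sufMin?_cons prog plyt.length a.toNat hkn hlen
    have hm : (match sufMin? prog plyt.length (a + 1).toNat with
        | none => PySem.List.pyGetD prog a 0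
        | some mv => if PySem.List.pyGetD prog a 0 < mv then PySem.List.pyGetD prog a 0 else mv)
        = sufMin prog plyt.length a.toNat := by
      rw [ha1, hprog]
      unfold sufMin
      rw [hsc]
      cases h : sufMin? prog plyt.length (a.toNat + 1)
      · rfl
      · simp only [Option.getD_some, if_lt_eq_min]
    have hsome : some (sufMin prog plyt.length a.toNat) = sufMin? prog plyt.length a.toNat := by
      unfold sufMin
      rw [hsc]
      rfl
    simp only [hm]
    rw [hsome]
    have htt : a.toNat = t := by omega
    rw [htt]
    rw [ih (a - 1) (by omega) (by omega) _ (by omega)]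
    have htt2 : t = a.toNat := by omega
    rw [ha1, htt2, cntTo_succ]
    have hcast : ((a.toNat : Int)) = a := by omega
    unfold hit
    rw [hcast]
    by_cases h : sufMin prog plyt.length a.toNat ≤ PySem.List.pyGetD plyt a 0 <;>
      simp [h, ge_iff_le] <;> omega

lemma a_eq (prog plyt : List Int) (hlen : plyt.length ≤ prog.length) (k : Nat) (hk : k ≤ plyt.length) :
    (PySem.List.pyRange 0 (k : Int) 1).foldl
      (fun lcz i => lcz + przetwarzanieInner prog plyt plyt.length i
          (PySem.List.pyRange 0 plyt.length 1)) 0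
    = cntTo prog plyt k := by
  induction k with
  | zero =>
    have h0 : ((0 : Nat) : Int) = 0 := by norm_num
    rw [h0, PySem.List.pyRange_one_eq_nil le_rfl]
    simp [cntTo]
  | succ k ih =>
    have hcast : ((k + 1 : Nat) : Int) = (k : Int) + 1 := by push_cast; ring
    rw [hcast, PySem.List.pyRange_one_succ_right (by positivity), List.foldl_append,
      ih (by omega), List.foldl_cons, List.foldl_nil]
    rw [inner_eq prog plyt hlen (k : Int) 0 (by positivity) le_rfl (by omega)]
    have hne : ((k : Int) + 0) ≠ (plyt.length : Int) := by omega
    rw [if_neg hne, cntTo_succ]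
    have ht : ((k : Int) + 0).toNat = k := by omega
    rw [ht]
    unfold hit
    by_cases h : sufMin prog plyt.length k ≤ PySem.List.pyGetD plyt (k : Int) 0 <;> simp [h]

-- ===== VERDICT (by name: the statement is the Claim_ definition above) =====
theorem przetwarzanie_spec : Claim_equal_przetwarzanie := by
  intro prog plyt _ hpre
  unfold Spec_przetwarzanie przetwarzanie przetwarzanie_alt
  rw [a_eq prog plyt hpre plyt.length le_rfl]
  by_cases hnil : plyt.length = 0
  · rw [hnil]
    simp only [Nat.cast_zero, zero_sub]
    rw [PySem.List.pyRange_neg_one_eq_nil (by omega)]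
    simp [cntTo]
  · have h1 : ((plyt.length : Int) - 1 + 1).toNat = plyt.length := by omega
    have hinv := alt_inv prog plyt hpre ((plyt.length : Int) - 1) (by omega) (by omega) 0
    rw [h1] at hinv
    have h2 : sufMin? prog plyt.length plyt.length = none := by
      unfold sufMin?
      rw [List.drop_eq_nil_of_le (by simp)]
      rfl
    rw [h2] at hinv
    rw [hinv]
    ring
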